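-- pv_equiv track=rewrite | github.com/Minerstove/Python | cs11/Prac6/6k.py | cheapest_deliveries
-- ===== SOURCE A (Python) =====
-- def cheapest_deliveries(s):
--     n = len(s)
--     possible_lists = [[] for _ in range(n)]
--     places_with_stations = []
--
--     for i in range(len(s)):
--         if s[i] > 0:
--             places_with_stations.append(i)
--
--     #get prices before i
--     for j in places_with_stations:
--         for k in range(len(s[:j])):
--             possible_lists[k] += [s[j] + (j - k)*100]
--
--     #get prices after i
--     for j in places_with_stations:
--         for k in range(len(s[j:])):
--             possible_lists[k + j] += [s[j] + (k)*100]
--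
--     return [min(x) for x in possible_lists]
-- ===== SOURCE B (Python) =====
-- def cheapest_deliveries(s):
--     # O(n): two linear scans (left-to-right and right-to-left) propagating the
--     # cheapest reachable station cost, +100 per step, then take the pointwise min.
--     def scan(xs):
--         out = []
--         best = None
--         for x in xs:
--             if best is not None:
--                 best += 100
--             if x > 0 and (best is None or x < best):
--                 best = x
--             out.append(best)
--         return out
--
--     left = scan(s)
--     right = scan(s[::-1])[::-1]
--     return [b if a is None or (b is not None and b < a) else a
--             for a, b in zip(left, right)]
-- ===== Notes on version B (the rewrite author's own statement) =====
-- stated objective: faster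
-- what changed: Replaced the per-station quadratic candidate-list construction (each station appends a cost to every position's list, then min per list) by two O(n) scans that propagate the cheapest reachable station cost +100 per step and take the pointwise min; Pre_ excludes inputs where A raises ValueError (nonempty list with no positive entry, min of an empty candidate list).
import Mathlib
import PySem

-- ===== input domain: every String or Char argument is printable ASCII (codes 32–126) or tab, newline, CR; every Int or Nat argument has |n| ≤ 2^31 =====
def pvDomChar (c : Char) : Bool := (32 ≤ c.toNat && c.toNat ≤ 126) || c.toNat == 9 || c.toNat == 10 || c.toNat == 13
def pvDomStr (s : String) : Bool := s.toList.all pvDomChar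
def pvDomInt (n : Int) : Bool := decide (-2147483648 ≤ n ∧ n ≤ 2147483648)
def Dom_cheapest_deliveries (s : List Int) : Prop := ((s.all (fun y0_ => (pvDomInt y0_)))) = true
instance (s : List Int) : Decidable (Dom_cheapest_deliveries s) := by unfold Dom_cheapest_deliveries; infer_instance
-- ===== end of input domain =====

-- B replaces A's quadratic per-station candidate-list construction by two O(n) scans
-- (left/right) that propagate the cheapest reachable station cost +100 per step.


-- ===== PORT A =====
def cheapest_deliveries (s : List Int) : List Int :=
  let n : Int := (s.length : Int)
  let possible0 : List (List Int) := (PySem.List.pyRange 0 n 1).map (fun _ => ([] : List Int))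
  let stations : List Int := (PySem.List.pyRange 0 n 1).foldl
    (fun acc i => if 0 < PySem.List.pyGetD s i 0 then acc ++ [i] else acc) []
  let possible1 := stations.foldl (fun pl j =>
    (PySem.List.pyRange 0 ((PySem.List.slice s none (some j)).length : Int) 1).foldl
      (fun pl k => PySem.List.pySetD pl k
        (PySem.List.pyGetD pl k [] ++ [PySem.List.pyGetD s j 0 + (j - k) * 100])) pl) possible0
  let possible2 := stations.foldl (fun pl j =>
    (PySem.List.pyRange 0 ((PySem.List.slice s (some j) none).length : Int) 1).foldl
      (fun pl k => PySem.List.pySetD pl (k + j)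
        (PySem.List.pyGetD pl (k + j) [] ++ [PySem.List.pyGetD s j 0 + k * 100])) pl) possible1
  -- min([]) raises ValueError in Python; Pre_ guarantees each candidate list is nonempty, so `.getD 0` is unreachable
  possible2.map (fun x => (PySem.List.min? x (fun y => y)).getD 0)

-- ===== PORT B =====
def pvStep (best : Option Int) (x : Int) : Option Int :=
  let b := match best with | none => none | some v => some (v + 100)
  if 0 < x && (match b with | none => true | some v => decide (x < v)) then some x else b

def pvScan (best : Option Int) : List Int → List (Option Int)
  | [] => []
  | x :: xs => pvStep best x :: pvScan (pvStep best x) xs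

def pvCombine (a b : Option Int) : Option Int :=
  match a, b with
  | none, b => b
  | some v, none => some v
  | some v, some w => if w < v then some w else some v

def cheapest_deliveries_alt (s : List Int) : List Int :=
  let left := pvScan none s
  let right := (pvScan none s.reverse).reverse
  -- under Pre_ some station exists, so the combined option is always `some`; `.getD 0` is unreachable
  (left.zip right).map (fun p => (pvCombine p.1 p.2).getD 0)

-- ===== PRECONDITION & SPEC =====
-- Pre_ excludes exactly the inputs where Python A raises ValueError (min of an empty
-- candidate list): a nonempty list with no positive entry.
def Pre_cheapest_deliveries (s : List Int) : Prop := s = [] ∨ ∃ x ∈ s, 0 < x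
instance (s : List Int) : Decidable (Pre_cheapest_deliveries s) := by unfold Pre_cheapest_deliveries; infer_instance
def pvWitness_cheapest_deliveries : List Int := [0, 3, 0, 200, 0]
def Spec_cheapest_deliveries (s : List Int) (out : List Int) : Prop := out = cheapest_deliveries_alt s
instance (s : List Int) (out : List Int) : Decidable (Spec_cheapest_deliveries s out) := by unfold Spec_cheapest_deliveries; infer_instance

-- ===== CLAIM (what is proved, stated in full; the proofs are below) =====
def Claim_equal_cheapest_deliveries : Prop := ∀ (s : List Int), Dom_cheapest_deliveries s → Pre_cheapest_deliveries s → Spec_cheapest_deliveries s (cheapest_deliveries s)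

-- ===== LEMMAS AND PROOFS =====

/-- Min of two optional costs (`none` = no station reachable). -/
def optMin : Option Int → Option Int → Option Int
  | none, b => b
  | some v, none => some v
  | some x, some y => some (min x y)

/-- Min of a list of costs, as an option. -/
def mval : List Int → Option Int
  | [] => none
  | x :: t => optMin (some x) (mval t)

/-- Candidate cost contributed by a cell holding `x` (a station iff `0 < x`). -/
def cnd (x : Int) : Option Int := if 0 < x then some x else none

/-- Cheapest cost at the LAST position of `l`, counting +100 per step of distance. -/
def mcost : List Int → Option Int
  | [] => none
  | x :: t => optMin ((cnd x).map (· + 100 * (t.length : Int))) (mcost t)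

theorem optMin_none_right (a : Option Int) : optMin a none = a := by cases a <;> rfl

theorem optMin_comm (a b : Option Int) : optMin a b = optMin b a := by
  cases a <;> cases b <;> simp [optMin, min_comm]

theorem optMin_assoc (a b c : Option Int) : optMin (optMin a b) c = optMin a (optMin b c) := by
  cases a <;> cases b <;> cases c <;> simp [optMin, min_assoc]

theorem optMin_map_add (a b : Option Int) (c : Int) :
    (optMin a b).map (· + c) = optMin (a.map (· + c)) (b.map (· + c)) := by
  cases a <;> cases b <;> simp [optMin, Option.map, min_add_add_right]

theorem mval_append (a b : List Int) : mval (a ++ b) = optMin (mval a) (mval b) := by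
  induction a with
  | nil => rfl
  | cons x t ih => simp [mval, ih, optMin_assoc]

theorem optMin_left_comm (a b c : Option Int) : optMin a (optMin b c) = optMin b (optMin a c) := by
  rw [← optMin_assoc, optMin_comm a b, optMin_assoc]

theorem mval_map_add (l : List Int) (c : Int) :
    mval (l.map (· + c)) = (mval l).map (· + c) := by
  induction l with
  | nil => rfl
  | cons x t ih =>
    show optMin (some (x + c)) (mval (t.map (· + c))) = (optMin (some x) (mval t)).map (· + c)
    rw [optMin_map_add, ih]
    rfl

theorem mval_eq_some_mem {l : List Int} {v : Int} (h : mval l = some v) : v ∈ l := by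
  induction l generalizing v with
  | nil => simp [mval] at h
  | cons x t ih =>
    simp only [mval] at h
    cases ht : mval t with
    | none =>
      rw [ht, optMin_none_right] at h
      rw [← Option.some.inj h]
      exact List.mem_cons_self
    | some w =>
      rw [ht] at h
      have hv : v = min x w := (Option.some.inj h).symm
      rcases le_total x w with hle | hle
      · rw [hv, min_eq_left hle]; exact List.mem_cons_self
      · rw [hv, min_eq_right hle]; exact List.mem_cons_of_mem _ (ih ht)

theorem optMin_some_of_mem {x : Int} {l : List Int} (h : x ∈ l) :
    optMin (some x) (mval l) = mval l := by
  induction l with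
  | nil => simp at h
  | cons y t ih =>
    rcases List.mem_cons.mp h with rfl | h
    · show optMin (some x) (optMin (some x) (mval t)) = optMin (some x) (mval t)
      rw [← optMin_assoc]
      have : optMin (some x) (some x) = some x := by simp [optMin]
      rw [this]
    · show optMin (some x) (optMin (some y) (mval t)) = optMin (some y) (mval t)
      rw [optMin_comm (some x), optMin_assoc, optMin_comm (mval t) (some x), ih h]

theorem min?_eq_mval (l : List Int) : PySem.List.min? l (fun y => y) = mval l := by
  cases l with
  | nil => rfl
  | cons x t =>
    rw [PySem.List.min?_id_cons]
    induction t generalizing x with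
    | nil => rfl
    | cons y t ih =>
      show some (List.foldl min (min x y) t) = optMin (some x) (optMin (some y) (mval t))
      rw [← optMin_assoc]
      show _ = optMin (some (min x y)) (mval t)
      exact ih (min x y)

theorem pvStep_eq (b : Option Int) (x : Int) :
    pvStep b x = optMin (cnd x) (b.map (· + 100)) := by
  cases b with
  | none => by_cases hx : 0 < x <;> simp [pvStep, cnd, optMin, hx]
  | some v =>
    by_cases hx : 0 < x <;> by_cases hlt : x < v + 100 <;>
      simp [pvStep, cnd, optMin, hx, hlt, min_def] <;> omega

theorem foldl_pvStep_closed (xs : List Int) (b : Option Int) :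
    xs.foldl pvStep b = optMin (b.map (· + 100 * (xs.length : Int))) (mcost xs) := by
  induction xs generalizing b with
  | nil => cases b <;> simp [mcost, optMin, Option.map]
  | cons x t ih =>
    show (t.foldl pvStep (pvStep b x)) = _
    rw [ih, pvStep_eq, optMin_map_add, Option.map_map]
    simp only [mcost, List.length_cons]
    have h1 : ((fun v => v + 100 * (t.length : Int)) ∘ (fun v => v + 100))
        = (fun v => v + 100 * ((t.length : Int) + 1)) := by
      funext v; simp; ring
    have h2 : (((t.length + 1 : Nat)) : Int) = (t.length : Int) + 1 := by push_cast; ring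
    rw [h1, h2, optMin_assoc, optMin_left_comm]

theorem mcost_append_singleton (a : List Int) (x : Int) :
    mcost (a ++ [x]) = optMin ((mcost a).map (· + 100)) (cnd x) := by
  induction a with
  | nil => cases h : cnd x <;> simp [mcost, optMin, h, Option.map]
  | cons y t ih =>
    show optMin ((cnd y).map (· + 100 * ((t ++ [x]).length : Int))) (mcost (t ++ [x]))
      = optMin ((mcost (y :: t)).map (· + 100)) (cnd x)
    rw [ih]
    simp only [mcost]
    rw [optMin_map_add, Option.map_map]
    have h1 : ((fun v => v + 100) ∘ (fun v => v + 100 * (t.length : Int)))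
        = (fun v => v + 100 * (((t ++ [x]).length : Int))) := by
      funext v; simp; ring
    rw [h1, ← optMin_assoc]

theorem mval_filter_eq_split (js : List Nat) (g : Nat → Int) (i : Nat) :
    mval ((js.filter (fun j => decide (i ≤ j))).map g) =
      optMin (mval ((js.filter (fun j => decide (j = i))).map g))
             (mval ((js.filter (fun j => decide (i < j))).map g)) := by
  induction js with
  | nil => rfl
  | cons j t ih =>
    rcases Nat.lt_trichotomy j i with h | h | h
    · have h1 : ¬ i ≤ j := by omega
      have h2 : ¬ j = i := by omega
      have h3 : ¬ i < j := by omega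
      simp only [List.filter_cons, decide_eq_true_eq]
      rw [if_neg h1, if_neg h2, if_neg h3]
      exact ih
    · have h1 : i ≤ j := by omega
      have h3 : ¬ i < j := by omega
      simp only [List.filter_cons, decide_eq_true_eq]
      rw [if_pos h1, if_pos h, if_neg h3]
      simp only [List.map_cons]
      show optMin (some (g j)) _ = optMin (optMin (some (g j)) _) _
      rw [ih, ← optMin_assoc]
    · have h1 : i ≤ j := by omega
      have h2 : ¬ j = i := by omega
      simp only [List.filter_cons, decide_eq_true_eq]
      rw [if_pos h1, if_neg h2, if_pos h]
      simp only [List.map_cons]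
      show optMin (some (g j)) _ = optMin _ (optMin (some (g j)) _)
      rw [ih, ← optMin_assoc, optMin_comm (some (g j)) (mval _), optMin_assoc]

/-- The station indices of `s`. -/
def stationsN (s : List Int) : List Nat :=
  (List.range s.length).filter (fun j => decide (0 < s.getD j 0))

/-- Candidates A collects for position `i` from stations strictly to the right. -/
def rcands (s : List Int) (i : Nat) : List Int :=
  ((stationsN s).filter (fun j => decide (i < j))).map
    (fun j => s.getD j 0 + ((j : Int) - (i : Int)) * 100)

/-- Candidates A collects for position `i` from stations at or to the left. -/
def lcands (s : List Int) (i : Nat) : List Int :=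
  ((stationsN s).filter (fun j => decide (j ≤ i))).map
    (fun j => s.getD j 0 + ((i - j : Nat) : Int) * 100)

theorem mcost_eq_mval (l : List Int) :
    mcost l = mval (((List.range l.length).filter (fun j => decide (0 < l.getD j 0))).map
      (fun j => l.getD j 0 + 100 * ((l.length - 1 - j : Nat) : Int))) := by
  induction l with
  | nil => rfl
  | cons x t ih =>
    simp only [List.length_cons, List.range_succ_eq_map, List.filter_cons, List.getD_cons_zero]
    have hfm : (List.filter (fun j => decide (0 < (x::t).getD j 0)) (List.map Nat.succ (List.range t.length)))
        = List.map Nat.succ (List.filter (fun j => decide (0 < t.getD j 0)) (List.range t.length)) := by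
      rw [List.filter_map]
      congr 1
    rw [hfm]
    by_cases hx : 0 < x
    · rw [if_pos (by simpa using hx)]
      simp only [List.map_cons, List.map_map]
      have hg : ((fun j => (x::t).getD j 0 + 100 * ((t.length + 1 - 1 - j : Nat) : Int)) ∘ Nat.succ)
          = (fun j => t.getD j 0 + 100 * ((t.length - 1 - j : Nat) : Int)) := by
        funext j
        simp only [Function.comp, List.getD_cons_succ]
        congr 2
        omega
      rw [hg]
      show mcost (x :: t) = optMin (some ((x::t).getD 0 0 + 100 * ((t.length + 1 - 1 - 0 : Nat) : Int))) _
      rw [← ih]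
      simp only [mcost, List.getD_cons_zero, cnd, if_pos hx, Option.map_some]
      norm_num
    · rw [if_neg (by simpa using hx)]
      simp only [List.map_map]
      have hg : ((fun j => (x::t).getD j 0 + 100 * ((t.length + 1 - 1 - j : Nat) : Int)) ∘ Nat.succ)
          = (fun j => t.getD j 0 + 100 * ((t.length - 1 - j : Nat) : Int)) := by
        funext j
        simp only [Function.comp, List.getD_cons_succ]
        congr 2
        omega
      rw [hg, ← ih]
      simp [mcost, cnd, hx, optMin]

theorem mcost_reverse_eq_mval (l : List Int) :
    mcost l.reverse = mval (((List.range l.length).filter (fun j => decide (0 < l.getD j 0))).map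
      (fun j => l.getD j 0 + 100 * (j : Int))) := by
  induction l with
  | nil => rfl
  | cons x t ih =>
    rw [List.reverse_cons, mcost_append_singleton, ih]
    simp only [List.length_cons, List.range_succ_eq_map, List.filter_cons, List.getD_cons_zero]
    have hfm : (List.filter (fun j => decide (0 < (x::t).getD j 0)) (List.map Nat.succ (List.range t.length)))
        = List.map Nat.succ (List.filter (fun j => decide (0 < t.getD j 0)) (List.range t.length)) := by
      rw [List.filter_map]
      congr 1
    rw [hfm]
    rw [← mval_map_add, List.map_map]
    have hg : ((fun v => v + 100) ∘ (fun j => t.getD j 0 + 100 * (j : Int)))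
        = ((fun j => (x::t).getD j 0 + 100 * (j : Int)) ∘ Nat.succ) := by
      funext j
      simp only [Function.comp, List.getD_cons_succ]
      push_cast
      ring
    rw [hg, ← List.map_map]
    by_cases hx : 0 < x
    · rw [if_pos (by simpa using hx)]
      simp only [List.map_cons, cnd, if_pos hx]
      show optMin (mval _) (some x) = optMin (some ((x::t).getD 0 0 + 100 * ((0:Nat) : Int))) (mval _)
      rw [optMin_comm]
      norm_num
    · rw [if_neg (by simpa using hx)]
      simp only [cnd, if_neg hx]
      show optMin (mval _) none = mval _
      exact optMin_none_right _

theorem mcost_take_eq (s : List Int) (i : Nat) (hi : i < s.length) :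
    mcost (s.take (i+1)) = mval (lcands s i) := by
  rw [mcost_eq_mval]
  have hlen : (s.take (i+1)).length = i+1 := by simp; omega
  rw [hlen]
  have hfilter : (List.range (i+1)).filter (fun j => decide (0 < (s.take (i+1)).getD j 0))
      = (List.range (i+1)).filter (fun j => decide (0 < s.getD j 0)) := by
    apply List.filter_congr
    intro j hj
    have hj' : j < i+1 := List.mem_range.mp hj
    rw [List.getD_eq_getElem?_getD, List.getElem?_take, if_pos hj', ← List.getD_eq_getElem?_getD]
  rw [hfilter]
  have hidx : (List.range (i+1)).filter (fun j => decide (0 < s.getD j 0))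
      = (stationsN s).filter (fun j => decide (j ≤ i)) := by
    unfold stationsN
    rw [List.filter_filter]
    have hsplit : List.range s.length
        = List.range (i+1) ++ (List.range (s.length - (i+1))).map (fun x => (i+1) + x) := by
      rw [← List.range_add]; congr 1; omega
    rw [hsplit, List.filter_append]
    have h2 : ((List.range (s.length - (i+1))).map (fun x => (i+1) + x)).filter
        (fun a => decide (a ≤ i) && decide (0 < s.getD a 0)) = [] := by
      rw [List.filter_eq_nil_iff]
      intro a ha
      rcases List.mem_map.mp ha with ⟨x, _, rfl⟩
      simp
      omega
    rw [h2, List.append_nil]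
    apply List.filter_congr
    intro j hj
    have hj' : j < i+1 := List.mem_range.mp hj
    have hj'' : j ≤ i := by omega
    simp [hj'']
  rw [hidx]
  unfold lcands
  apply congrArg
  apply List.map_congr_left
  intro j hj
  have hji : j ≤ i := by
    rcases List.mem_filter.mp hj with ⟨_, h2⟩
    simpa using h2
  have hjlt : j < i + 1 := by omega
  rw [List.getD_eq_getElem?_getD, List.getElem?_take, if_pos hjlt, ← List.getD_eq_getElem?_getD]
  have hsub : (i + 1 - 1 - j : Nat) = (i - j : Nat) := by omega
  rw [hsub]
  ring

theorem mcost_drop_rev_eq (s : List Int) (i : Nat) (hi : i < s.length) :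
    mcost ((s.drop i).reverse) =
      mval (((stationsN s).filter (fun j => decide (i ≤ j))).map
        (fun j => s.getD j 0 + ((j : Int) - (i : Int)) * 100)) := by
  rw [mcost_reverse_eq_mval]
  have hlen : (s.drop i).length = s.length - i := by simp
  rw [hlen]
  have hfilter : (List.range (s.length - i)).filter (fun j => decide (0 < (s.drop i).getD j 0))
      = (List.range (s.length - i)).filter (fun j => decide (0 < s.getD (i+j) 0)) := by
    apply List.filter_congr
    intro j hj
    rw [List.getD_eq_getElem?_getD, List.getElem?_drop, ← List.getD_eq_getElem?_getD]
  rw [hfilter]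
  have hidx : (stationsN s).filter (fun j => decide (i ≤ j))
      = ((List.range (s.length - i)).filter (fun j => decide (0 < s.getD (i+j) 0))).map
          (fun j => i + j) := by
    unfold stationsN
    rw [List.filter_filter]
    have hsplit : List.range s.length
        = List.range i ++ (List.range (s.length - i)).map (fun x => i + x) := by
      rw [← List.range_add]; congr 1; omega
    rw [hsplit, List.filter_append]
    have h1 : (List.range i).filter (fun a => decide (i ≤ a) && decide (0 < s.getD a 0)) = [] := by
      rw [List.filter_eq_nil_iff]
      intro a ha
      have := List.mem_range.mp ha
      simp
      omega
    rw [h1, List.nil_append, List.filter_map]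
    apply congrArg
    apply List.filter_congr
    intro j hj
    simp [Function.comp]
  rw [hidx, List.map_map]
  apply congrArg
  apply List.map_congr_left
  intro j hj
  simp only [Function.comp]
  rw [List.getD_eq_getElem?_getD, List.getElem?_drop, ← List.getD_eq_getElem?_getD]
  push_cast
  ring

/-- Per-position value equality between the two algorithms' option-level results. -/
theorem key_eq (s : List Int) (i : Nat) (hi : i < s.length) :
    optMin (mcost (s.take (i+1))) (mcost ((s.drop i).reverse))
      = mval (rcands s i ++ lcands s i) := by
  simp only [rcands]
  rw [mval_append, mcost_take_eq s i hi, mcost_drop_rev_eq s i hi,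
    mval_filter_eq_split (stationsN s) _ i]
  set E := mval (((stationsN s).filter (fun j => decide (j = i))).map
      (fun j => s.getD j 0 + ((j : Int) - (i : Int)) * 100)) with hE
  cases hEc : E with
  | none => rw [optMin_comm]; rfl
  | some v =>
    have hv : v ∈ lcands s i := by
      have := mval_eq_some_mem (hE ▸ hEc)
      rcases List.mem_map.mp this with ⟨j, hj, hval⟩
      rcases List.mem_filter.mp hj with ⟨hjs, hji⟩
      have hji' : j = i := by simpa using hji
      subst hji'
      refine List.mem_map.mpr ⟨j, List.mem_filter.mpr ⟨hjs, by simp⟩, ?_⟩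
      omega
    rw [optMin_left_comm, optMin_comm (mval (lcands s i)), optMin_left_comm,
      optMin_some_of_mem hv]

theorem length_pvScan (b : Option Int) (xs : List Int) : (pvScan b xs).length = xs.length := by
  induction xs generalizing b with
  | nil => rfl
  | cons x t ih => simp [pvScan, ih]

theorem pvScan_getElem? (xs : List Int) (b : Option Int) (i : Nat) (hi : i < xs.length) :
    (pvScan b xs)[i]? = some ((xs.take (i+1)).foldl pvStep b) := by
  induction xs generalizing b i with
  | nil => simp at hi
  | cons x t ih =>
    cases i with
    | zero => rfl
    | succ m =>
      show (pvScan (pvStep b x) t)[m]? = _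
      rw [ih (pvStep b x) m (by simpa using hi)]
      rfl

theorem setfold_length (m o : Nat) (v : Nat → Int) (pl : List (List Int)) :
    (((List.range m).foldl (fun pl k => pl.set (o+k) (pl.getD (o+k) [] ++ [v k])) pl)).length
      = pl.length := by
  induction m generalizing pl with
  | zero => rfl
  | succ m ih =>
    rw [List.range_succ, List.foldl_append]
    simp only [List.foldl_cons, List.foldl_nil, List.length_set]
    exact ih pl

/-- A's nested candidate-appending fold, characterised pointwise. -/
theorem setfold_getD (m o : Nat) (v : Nat → Int) : ∀ (pl : List (List Int)),
    o + m ≤ pl.length → ∀ (i : Nat),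
    (((List.range m).foldl (fun pl k => pl.set (o+k) (pl.getD (o+k) [] ++ [v k])) pl)).getD i []
      = if o ≤ i ∧ i < o + m then pl.getD i [] ++ [v (i - o)] else pl.getD i [] := by
  induction m with
  | zero =>
    intro pl h i
    simp
  | succ m ih =>
    intro pl h i
    rw [List.range_succ, List.foldl_append]
    simp only [List.foldl_cons, List.foldl_nil]
    have hlen : ((List.range m).foldl
        (fun pl k => pl.set (o+k) (pl.getD (o+k) [] ++ [v k])) pl).length = pl.length :=
      setfold_length m o v pl
    set P := (List.range m).foldl (fun pl k => pl.set (o+k) (pl.getD (o+k) [] ++ [v k])) pl with hP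
    have hgd : ∀ j, P.getD j []
        = if o ≤ j ∧ j < o + m then pl.getD j [] ++ [v (j - o)] else pl.getD j [] :=
      fun j => ih pl (by omega) j
    rw [List.getD_eq_getElem?_getD, List.getElem?_set]
    by_cases he : o + m = i
    · subst he
      rw [if_pos rfl, if_pos (by omega : o + m < P.length), Option.getD_some, hgd (o+m)]
      rw [if_neg (by omega), if_pos (by omega)]
      simp
    · rw [if_neg he, ← List.getD_eq_getElem?_getD, hgd i]
      by_cases hc : o ≤ i ∧ i < o + m
      · rw [if_pos hc, if_pos (by omega)]
      · rw [if_neg hc, if_neg (by omega)]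

/-- Value appended to position `k`'s list by station `j` in A's first nest. -/
def vL (s : List Int) (j k : Nat) : Int := s.getD j 0 + ((j : Int) - (k : Int)) * 100
/-- Value appended to position `j+k`'s list by station `j` in A's second nest. -/
def vR (s : List Int) (j k : Nat) : Int := s.getD j 0 + (k : Int) * 100

def nest1 (s : List Int) (pl : List (List Int)) (js : List Nat) : List (List Int) :=
  js.foldl (fun pl j =>
    (List.range j).foldl (fun pl k => pl.set k (pl.getD k [] ++ [vL s j k])) pl) pl

def nest2 (s : List Int) (pl : List (List Int)) (js : List Nat) : List (List Int) :=
  js.foldl (fun pl j =>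
    (List.range (s.length - j)).foldl
      (fun pl k => pl.set (k+j) (pl.getD (k+j) [] ++ [vR s j k])) pl) pl

theorem nest1_length (s : List Int) (js : List Nat) : ∀ pl, (nest1 s pl js).length = pl.length := by
  induction js with
  | nil => intro pl; rfl
  | cons j t ih =>
    intro pl
    show (nest1 s _ t).length = _
    rw [ih]
    have := setfold_length j 0 (vL s j) pl
    simpa using this

theorem nest2_length (s : List Int) (js : List Nat) : ∀ pl, (nest2 s pl js).length = pl.length := by
  induction js with
  | nil => intro pl; rfl
  | cons j t ih =>
    intro pl
    show (nest2 s _ t).length = _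
    rw [ih]
    show (List.foldl (fun pl k => pl.set (k+j) (pl.getD (k+j) [] ++ [vR s j k])) pl
      (List.range (s.length - j))).length = pl.length
    have heq : (fun (pl : List (List Int)) (k : Nat) => pl.set (k+j) (pl.getD (k+j) [] ++ [vR s j k]))
        = (fun pl k => pl.set (j+k) (pl.getD (j+k) [] ++ [vR s j k])) := by
      funext pl k
      rw [Nat.add_comm k j]
    rw [heq]
    exact setfold_length (s.length - j) j (vR s j) pl

theorem nest1_getD (s : List Int) (js : List Nat) : ∀ pl, (∀ j ∈ js, j ≤ pl.length) →
    ∀ i, i < pl.length →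
    (nest1 s pl js).getD i []
      = pl.getD i [] ++ (js.filter (fun j => decide (i < j))).map (fun j => vL s j i) := by
  induction js with
  | nil =>
    intro pl _ i _
    simp [nest1]
  | cons j t ih =>
    intro pl hjs i hi
    show (nest1 s ((List.range j).foldl
        (fun pl k => pl.set k (pl.getD k [] ++ [vL s j k])) pl) t).getD i [] = _
    have hj : j ≤ pl.length := hjs j (List.mem_cons_self)
    have hlen : ((List.range j).foldl
        (fun pl k => pl.set k (pl.getD k [] ++ [vL s j k])) pl).length = pl.length := by
      have := setfold_length j 0 (vL s j) pl
      simpa using this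
    rw [ih _ (by intro a ha; rw [hlen]; exact hjs a (List.mem_cons_of_mem _ ha)) i (by omega)]
    have hset := setfold_getD j 0 (vL s j) pl (by omega) i
    simp only [Nat.zero_add, Nat.zero_le, true_and, Nat.sub_zero] at hset
    rw [hset]
    simp only [List.filter_cons, decide_eq_true_eq]
    by_cases hc : i < j
    · rw [if_pos hc, if_pos hc, List.map_cons, List.append_assoc, List.singleton_append]
    · rw [if_neg hc, if_neg hc]

theorem nest2_getD (s : List Int) (js : List Nat) : ∀ pl, pl.length = s.length →
    (∀ j ∈ js, j ≤ s.length) → ∀ i, i < s.length →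
    (nest2 s pl js).getD i []
      = pl.getD i [] ++ (js.filter (fun j => decide (j ≤ i))).map (fun j => vR s j (i - j)) := by
  induction js with
  | nil =>
    intro pl _ _ i _
    simp [nest2]
  | cons j t ih =>
    intro pl hpl hjs i hi
    have heq : (fun (pl : List (List Int)) (k : Nat) => pl.set (k+j) (pl.getD (k+j) [] ++ [vR s j k]))
        = (fun pl k => pl.set (j+k) (pl.getD (j+k) [] ++ [vR s j k])) := by
      funext pl k
      rw [Nat.add_comm k j]
    show (nest2 s ((List.range (s.length - j)).foldl
        (fun pl k => pl.set (k+j) (pl.getD (k+j) [] ++ [vR s j k])) pl) t).getD i [] = _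
    rw [heq]
    have hj : j ≤ s.length := hjs j (List.mem_cons_self)
    have hlen := setfold_length (s.length - j) j (vR s j) pl
    rw [ih _ (by omega) (by intro a ha; exact hjs a (List.mem_cons_of_mem _ ha)) i hi]
    have hset := setfold_getD (s.length - j) j (vR s j) pl (by omega) i
    rw [hset]
    simp only [List.filter_cons, decide_eq_true_eq]
    by_cases hc : j ≤ i
    · rw [if_pos (by omega : j ≤ i ∧ i < j + (s.length - j)), if_pos hc, List.map_cons,
        List.append_assoc, List.singleton_append]
    · rw [if_neg (by omega), if_neg hc]

theorem pvCombine_eq (a b : Option Int) : pvCombine a b = optMin a b := by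
  cases a with
  | none => cases b <;> rfl
  | some v =>
    cases b with
    | none => rfl
    | some w =>
      simp only [pvCombine, optMin]
      split_ifs with h
      · rw [min_eq_right (le_of_lt h)]
      · rw [min_eq_left (by omega)]

theorem foldl_pvStep_none (xs : List Int) : xs.foldl pvStep none = mcost xs := by
  rw [foldl_pvStep_closed]
  rfl

theorem B_eq (s : List Int) : cheapest_deliveries_alt s
    = (List.range s.length).map (fun i =>
        (optMin (mcost (s.take (i+1))) (mcost ((s.drop i).reverse))).getD 0) := by
  simp only [cheapest_deliveries_alt]
  apply List.ext_getElem
  · simp [length_pvScan]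
  · intro i h1 h2
    have hi : i < s.length := by simpa using h2
    have hlenL : i < (pvScan none s).length := by rw [length_pvScan]; exact hi
    have hlenR : i < ((pvScan none s.reverse).reverse).length := by
      simp [length_pvScan]; exact hi
    rw [List.getElem_map, List.getElem_zip, List.getElem_map, List.getElem_range]
    have hL : (pvScan none s)[i] = mcost (s.take (i+1)) := by
      have h := pvScan_getElem? s none i hi
      rw [List.getElem?_eq_getElem hlenL] at h
      rw [Option.some.inj h, foldl_pvStep_none]
    have hR : ((pvScan none s.reverse).reverse)[i] = mcost ((s.drop i).reverse) := by
      have h1 : ((pvScan none s.reverse).reverse)[i]? = some (mcost ((s.drop i).reverse)) := by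
        rw [List.getElem?_reverse (by rw [length_pvScan, List.length_reverse]; exact hi)]
        rw [length_pvScan, List.length_reverse]
        rw [pvScan_getElem? s.reverse none (s.length - 1 - i)
          (by rw [List.length_reverse]; omega)]
        rw [foldl_pvStep_none]
        have hn : s.length - 1 - i + 1 = s.length - i := by omega
        rw [hn, List.take_reverse]
        have hm : s.length - (s.length - i) = i := by omega
        rw [hm]
      have h2 := List.getElem?_eq_getElem hlenR
      rw [h1] at h2
      exact (Option.some.inj h2).symm
    rw [hL, hR, pvCombine_eq]

theorem stationsN_lt {s : List Int} {j : Nat} (h : j ∈ stationsN s) : j < s.length := by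
  unfold stationsN at h
  exact List.mem_range.mp (List.mem_filter.mp h).1

theorem map_const_nil_getD (L : List Int) (i : Nat) :
    (L.map (fun _ => ([] : List Int))).getD i [] = [] := by
  rw [List.getD_eq_getElem?_getD, List.getElem?_map]
  cases L[i]? <;> simp

theorem A_eq (s : List Int) : cheapest_deliveries s
    = (List.range s.length).map (fun i => (mval (rcands s i ++ lcands s i)).getD 0) := by
  have hsta : (PySem.List.pyRange 0 (s.length : Int) 1).foldl
      (fun acc i => if 0 < PySem.List.pyGetD s i 0 then acc ++ [i] else acc) []
      = (stationsN s).map (fun (j : Nat) => (j : Int)) := by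
    rw [PySem.List.foldl_append_ite_eq_filter, List.nil_append,
      PySem.List.pyRange_zero_natCast, List.filter_map]
    unfold stationsN
    apply congrArg
    apply List.filter_congr
    intro j _
    simp
  have hinner1 : ∀ (pl : List (List Int)) (j : Nat), j ∈ stationsN s →
      (PySem.List.pyRange 0 ((PySem.List.slice s none (some (j:Int))).length : Int) 1).foldl
        (fun pl k => PySem.List.pySetD pl k
          (PySem.List.pyGetD pl k [] ++ [PySem.List.pyGetD s (j:Int) 0 + ((j:Int) - k) * 100])) pl
      = (List.range j).foldl (fun pl k => pl.set k (pl.getD k [] ++ [vL s j k])) pl := by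
    intro pl j hj
    have hjn : j < s.length := stationsN_lt hj
    rw [PySem.List.slice_to_natCast]
    have hlt : ((List.take j s).length : Int) = ((j : Nat) : Int) := by
      simp
      omega
    rw [hlt, PySem.List.pyRange_zero_natCast, List.foldl_map]
    apply PySem.List.foldl_congr_mem
    intro acc k _
    simp [vL]
  have hinner2 : ∀ (pl : List (List Int)) (j : Nat), j ∈ stationsN s →
      (PySem.List.pyRange 0 ((PySem.List.slice s (some (j:Int)) none).length : Int) 1).foldl
        (fun pl k => PySem.List.pySetD pl (k + (j:Int))
          (PySem.List.pyGetD pl (k + (j:Int)) [] ++ [PySem.List.pyGetD s (j:Int) 0 + k * 100])) pl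
      = (List.range (s.length - j)).foldl
          (fun pl k => pl.set (k+j) (pl.getD (k+j) [] ++ [vR s j k])) pl := by
    intro pl j hj
    rw [PySem.List.slice_from_natCast]
    have hlt : ((List.drop j s).length : Int) = ((s.length - j : Nat) : Int) := by
      simp
    rw [hlt, PySem.List.pyRange_zero_natCast, List.foldl_map]
    apply PySem.List.foldl_congr_mem
    intro acc k _
    have hc : (k : Int) + (j : Int) = ((k + j : Nat) : Int) := by push_cast; ring
    rw [hc]
    simp only [PySem.List.pySetD_natCast, PySem.List.pyGetD_natCast, vR]
  simp only [cheapest_deliveries]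
  rw [hsta]
  simp only [List.foldl_map]
  rw [PySem.List.foldl_congr_mem (l := stationsN s)
    (f := fun (pl : List (List Int)) (j : Nat) =>
      (PySem.List.pyRange 0 ((PySem.List.slice s none (some (j:Int))).length : Int) 1).foldl
        (fun pl k => PySem.List.pySetD pl k
          (PySem.List.pyGetD pl k [] ++ [PySem.List.pyGetD s (j:Int) 0 + ((j:Int) - k) * 100])) pl)
    (g := fun pl j => (List.range j).foldl
        (fun pl k => pl.set k (pl.getD k [] ++ [vL s j k])) pl)
    (init := (PySem.List.pyRange 0 (s.length : Int) 1).map (fun _ => ([] : List Int)))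
    (fun acc j hj => hinner1 acc j hj)]
  rw [PySem.List.foldl_congr_mem (l := stationsN s)
    (f := fun (pl : List (List Int)) (j : Nat) =>
      (PySem.List.pyRange 0 ((PySem.List.slice s (some (j:Int)) none).length : Int) 1).foldl
        (fun pl k => PySem.List.pySetD pl (k + (j:Int))
          (PySem.List.pyGetD pl (k + (j:Int)) [] ++ [PySem.List.pyGetD s (j:Int) 0 + k * 100])) pl)
    (g := fun pl j => (List.range (s.length - j)).foldl
        (fun pl k => pl.set (k+j) (pl.getD (k+j) [] ++ [vR s j k])) pl)
    (init := (stationsN s).foldl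
      (fun pl j => (List.range j).foldl (fun pl k => pl.set k (pl.getD k [] ++ [vL s j k])) pl)
      ((PySem.List.pyRange 0 (s.length : Int) 1).map (fun _ => ([] : List Int))))
    (fun acc j hj => hinner2 acc j hj)]
  set P0 := (PySem.List.pyRange 0 (s.length : Int) 1).map (fun _ => ([] : List Int)) with hP0
  have hP0len : P0.length = s.length := by
    rw [hP0, List.length_map, PySem.List.pyRange_zero_natCast, List.length_map,
      List.length_range]
  show (nest2 s (nest1 s P0 (stationsN s)) (stationsN s)).map
      (fun x => (PySem.List.min? x (fun y => y)).getD 0) = _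
  apply List.ext_getElem
  · rw [List.length_map, List.length_map, List.length_range, nest2_length, nest1_length, hP0len]
  · intro i h1 h2
    have hi : i < s.length := by simpa using h2
    rw [List.getElem_map, List.getElem_map, List.getElem_range]
    have hlen1 : (nest1 s P0 (stationsN s)).length = s.length := by
      rw [nest1_length, hP0len]
    have hg : (nest2 s (nest1 s P0 (stationsN s)) (stationsN s))[i]'(by
        rw [nest2_length, hlen1]; exact hi) = rcands s i ++ lcands s i := by
      rw [← List.getD_eq_getElem _ ([] : List Int)]
      rw [nest2_getD s (stationsN s) _ hlen1 (fun j hj => le_of_lt (stationsN_lt hj)) i hi]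
      rw [nest1_getD s (stationsN s) P0
        (fun j hj => by rw [hP0len]; exact le_of_lt (stationsN_lt hj)) i (by omega)]
      rw [hP0, map_const_nil_getD, List.nil_append]
      rfl
    rw [hg, min?_eq_mval]

-- ===== VERDICT (by name: the statement is the Claim_ definition above) =====
theorem cheapest_deliveries_spec : Claim_equal_cheapest_deliveries := by
  intro s _ _
  show cheapest_deliveries s = cheapest_deliveries_alt s
  rw [A_eq, B_eq]
  apply List.map_congr_left
  intro i hmem
  have hi : i < s.length := List.mem_range.mp hmem
  rw [key_eq s i hi]
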